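-- pv_equiv track=rewrite | github.com/expiesere/AyED1-2024-TPs | TP.3/ejercicio_2.py | matriz_e
-- ===== SOURCE A (Python) =====
-- from typing import List
--
-- def matriz_e(n: int) -> List[List[int]]:
--     """
--     Genera una matriz de tamaño ( N ) con numeros
--     consecutivos en las diagonales.
--
--     Pre:
--         -n(int): Valor N que ingresa el usuario para determinar el
--         tamaño de la matriz.
--
--     Post:
--         -List[List[int]]: Matriz con numeros consecutivos en las diagonales.
--     """
--     matriz = [[0 for _ in range(n)] for _ in range(n)]
--     num = 1
--     for diag in range(2 * n - 1):
--         if diag % 2 == 0: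
--             for i in range(max(0, diag - n + 1), min(n, diag + 1)):
--                 j = diag - i
--                 matriz[i][j] = num
--                 num += 1
--     return matriz
-- ===== SOURCE B (Python) =====
-- from typing import List
--
-- def matriz_e(n: int) -> List[List[int]]:
--     # Prefix table: first number placed on each even diagonal, then row-major fill.
--     start = {}
--     num = 1
--     for d in range(0, 2 * n - 1, 2):
--         start[d] = num
--         num += min(n, d + 1) - max(0, d - n + 1)
--     return [[start[i + j] + (i - max(0, i + j - n + 1)) if (i + j) % 2 == 0 else 0
--              for j in range(n)]
--             for i in range(n)]
-- ===== Notes on version B (the rewrite author's own statement) =====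
-- stated objective: alternative
-- what changed: A fills the matrix by sweeping even diagonals with a single mutating counter; B first builds a prefix-sum table of each even diagonal's starting number and then produces the matrix as a pure row-major comprehension computing each cell from that table.
import Mathlib
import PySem

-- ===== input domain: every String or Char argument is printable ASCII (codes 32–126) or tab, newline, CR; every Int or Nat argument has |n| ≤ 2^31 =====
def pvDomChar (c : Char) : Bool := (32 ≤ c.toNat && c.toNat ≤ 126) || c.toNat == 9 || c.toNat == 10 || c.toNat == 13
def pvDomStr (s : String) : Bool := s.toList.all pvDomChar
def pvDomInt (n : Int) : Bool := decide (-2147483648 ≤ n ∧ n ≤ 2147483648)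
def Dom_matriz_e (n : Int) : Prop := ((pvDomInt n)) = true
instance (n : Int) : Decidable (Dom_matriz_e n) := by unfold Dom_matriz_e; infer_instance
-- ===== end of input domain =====

-- B replaces A's single mutating diagonal sweep with a per-diagonal start table (prefix sums)
-- plus a pure row-major comprehension; objective: alternative decomposition, same cost.

-- ===== PORT A =====
-- inner loop body: matriz[i][j] = num; num += 1  (i, j are always in range here)
def pvAinner (diag : Int) (st : List (List Int) × Int) (i : Int) : List (List Int) × Int :=
  let j := diag - i
  (PySem.List.pySetD st.1 i (PySem.List.pySetD (PySem.List.pyGetD st.1 i []) j st.2), st.2 + 1)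

-- outer loop body: if diag % 2 == 0: for i in range(max(0, diag-n+1), min(n, diag+1)): …
def pvAouter (n : Int) (st : List (List Int) × Int) (diag : Int) : List (List Int) × Int :=
  if PySem.Int.mod diag 2 == 0 then
    (PySem.List.pyRange (max 0 (diag - n + 1)) (min n (diag + 1)) 1).foldl (pvAinner diag) st
  else st

def matriz_e (n : Int) : List (List Int) :=
  let matriz : List (List Int) :=
    (PySem.List.pyRange 0 n 1).map (fun _ => (PySem.List.pyRange 0 n 1).map (fun _ => (0 : Int)))
  ((PySem.List.pyRange 0 (2 * n - 1) 1).foldl (pvAouter n) (matriz, 1)).1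

-- ===== PORT B =====
-- loop body of B's first pass: start[d] = num; num += min(n, d+1) - max(0, d-n+1)
def pvBstep (n : Int) (p : PySem.Dict Int Int × Int) (d : Int) : PySem.Dict Int Int × Int :=
  (p.1.insert d p.2, p.2 + (min n (d + 1) - max 0 (d - n + 1)))

def matriz_e_alt (n : Int) : List (List Int) :=
  let st := (PySem.List.pyRange 0 (2 * n - 1) 2).foldl (pvBstep n) (PySem.Dict.empty, 1)
  (PySem.List.pyRange 0 n 1).map (fun i =>
    (PySem.List.pyRange 0 n 1).map (fun j =>
      if PySem.Int.mod (i + j) 2 == 0 then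
        -- start[i + j]: the key is always present for even i+j in range
        st.1.getD (i + j) 0 + (i - max 0 (i + j - n + 1))
      else 0))

-- ===== PRECONDITION & SPEC =====
def Spec_matriz_e (n : Int) (out : List (List Int)) : Prop := out = matriz_e_alt n
instance (n : Int) (out : List (List Int)) : Decidable (Spec_matriz_e n out) := by unfold Spec_matriz_e; infer_instance

-- ===== CLAIM (what is proved, stated in full; the proofs are below) =====
def Claim_equal_matriz_e : Prop := ∀ (n : Int), Dom_matriz_e n → Spec_matriz_e n (matriz_e n)

-- ===== LEMMAS AND PROOFS =====

-- length of even diagonal d, and first number placed on even diagonal D (1 + lengths of even diagonals before D)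
def pvLen (n d : Int) : Int := min n (d + 1) - max 0 (d - n + 1)
def pvS (n D : Int) : Int := 1 + ((PySem.List.pyRange 0 D 2).map (pvLen n)).sum

-- matrix entry with defaults, and the n×n shape invariant
def pvEnt (M : List (List Int)) (i j : Nat) : Int := (M.getD i []).getD j 0
def pvShape (n : Int) (M : List (List Int)) : Prop :=
  M.length = n.toNat ∧ ∀ r ∈ M, r.length = n.toNat

theorem pr2_even (D : Int) (h0 : 0 ≤ D) (he : 2 ∣ D) :
    PySem.List.pyRange 0 (D + 1) 2 = PySem.List.pyRange 0 D 2 ++ [D] := by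
  obtain ⟨t, rfl⟩ := he
  rw [PySem.List.pyRange_of_pos 0 (2 * t + 1) (by norm_num),
      PySem.List.pyRange_of_pos 0 (2 * t) (by norm_num)]
  have h1 : ((2 * t + 1 - 0 + 2 - 1) / 2).toNat = t.toNat + 1 := by omega
  have h2 : (if (0 : Int) < 2 * t then ((2 * t - 0 + 2 - 1) / 2).toNat else 0) = t.toNat := by
    split_ifs with h <;> omega
  rw [if_pos (by omega), h1, h2, List.range_succ, List.map_append]
  simp only [List.map_cons, List.map_nil]
  congr 2
  omega

theorem pr2_odd (D : Int) (h0 : 0 ≤ D) (ho : ¬ 2 ∣ D) :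
    PySem.List.pyRange 0 (D + 1) 2 = PySem.List.pyRange 0 D 2 := by
  obtain ⟨t, rfl⟩ : ∃ t, D = 2 * t + 1 := ⟨D / 2, by omega⟩
  rw [PySem.List.pyRange_of_pos 0 (2 * t + 1 + 1) (by norm_num),
      PySem.List.pyRange_of_pos 0 (2 * t + 1) (by norm_num)]
  rw [if_pos (by omega), if_pos (by omega)]
  have h1 : ((2 * t + 1 + 1 - 0 + 2 - 1) / 2).toNat = ((2 * t + 1 - 0 + 2 - 1) / 2).toNat := by
    omega
  rw [h1]

theorem bfold_snd (n : Int) (L : List Int) (p : PySem.Dict Int Int × Int) :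
    (L.foldl (pvBstep n) p).2 = p.2 + (L.map (pvLen n)).sum := by
  induction L generalizing p with
  | nil => simp
  | cons d L ih => simp [ih, pvBstep, pvLen]; ring

theorem bfold_getD (n k : Int) (hk : 0 ≤ k) (hke : 2 ∣ k) :
    ∀ D : Int, k + 1 ≤ D →
      ((PySem.List.pyRange 0 D 2).foldl (pvBstep n) (PySem.Dict.empty, 1)).1.getD k 0 = pvS n k := by
  intro D hD
  induction D, hD using Int.le_induction with
  | base =>
      rw [pr2_even k hk hke, List.foldl_append]
      have hfin : ∀ p : PySem.Dict Int Int × Int,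
          (List.foldl (pvBstep n) p [k]).1.getD k 0 = p.2 := by
        intro p
        simp only [List.foldl_cons, List.foldl_nil, pvBstep]
        rw [PySem.Dict.getD_insert, if_pos rfl]
      rw [hfin, bfold_snd]
      rfl
  | succ D hD1 ih =>
      by_cases hD2 : 2 ∣ D
      · rw [pr2_even D (by omega) hD2, List.foldl_append]
        have hfin : ∀ p : PySem.Dict Int Int × Int,
            (List.foldl (pvBstep n) p [D]).1.getD k 0 = p.1.getD k 0 := by
          intro p
          simp only [List.foldl_cons, List.foldl_nil, pvBstep]
          rw [PySem.Dict.getD_insert, if_neg (by omega)]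
        rw [hfin]
        exact ih
      · rw [pr2_odd D (by omega) hD2]
        exact ih

theorem getD_getD_replicate (m k : Nat) (i j : Nat) :
    ((List.replicate m (List.replicate k (0 : Int))).getD i []).getD j 0 = 0 := by
  have h1 : (List.replicate m (List.replicate k (0 : Int))).getD i []
      = if i < m then List.replicate k (0 : Int) else [] := by
    split_ifs with hi
    · rw [List.getD_eq_getElem _ _ (by simpa using hi), List.getElem_replicate]
    · rw [List.getD_eq_default _ _ (by simpa using hi)]
  rw [h1]
  split_ifs with hi
  · rcases lt_or_ge j k with hj | hj
    · rw [List.getD_eq_getElem _ _ (by simpa using hj), List.getElem_replicate]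
    · rw [List.getD_eq_default _ _ (by simpa using hj)]
  · rfl

theorem ent_zeros (n : Int) (i j : Nat) :
    pvEnt ((PySem.List.pyRange 0 n 1).map (fun _ => (PySem.List.pyRange 0 n 1).map (fun _ => (0 : Int)))) i j = 0 := by
  unfold pvEnt
  rw [List.map_const', List.map_const']
  exact getD_getD_replicate _ _ i j

theorem shape_zeros (n : Int) :
    pvShape n ((PySem.List.pyRange 0 n 1).map (fun _ => (PySem.List.pyRange 0 n 1).map (fun _ => (0 : Int)))) := by
  constructor
  · rw [List.length_map, PySem.List.length_pyRange_one]
    omega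
  · intro r hr
    simp only [List.mem_map] at hr
    obtain ⟨_, _, rfl⟩ := hr
    rw [List.length_map, PySem.List.length_pyRange_one]
    omega

theorem ent_set (M : List (List Int)) (r c : Nat) (v : Int) (hr : r < M.length)
    (hc : c < (M.getD r []).length) (i j : Nat) :
    pvEnt (M.set r ((M.getD r []).set c v)) i j =
      if i = r ∧ j = c then v else pvEnt M i j := by
  unfold pvEnt
  by_cases hir : i = r
  · subst hir
    have h1 : (M.set i ((M.getD i []).set c v)).getD i [] = (M.getD i []).set c v := by
      rw [List.getD_eq_getElem?_getD, List.getElem?_set_self (by simpa using hr),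
        Option.getD_some]
    rw [h1]
    by_cases hjc : j = c
    · subst hjc
      rw [if_pos ⟨rfl, rfl⟩, List.getD_eq_getElem?_getD,
        List.getElem?_set_self (by simpa using hc), Option.getD_some]
    · rw [if_neg (by tauto)]
      have h2 : ((M.getD i []).set c v).getD j 0 = (M.getD i []).getD j 0 := by
        rw [List.getD_eq_getElem?_getD, List.getElem?_set_ne (by omega),
          ← List.getD_eq_getElem?_getD]
      rw [h2]
  · rw [if_neg (by tauto)]
    have h1 : (M.set r ((M.getD r []).set c v)).getD i [] = M.getD i [] := by
      rw [List.getD_eq_getElem?_getD, List.getElem?_set_ne (by omega),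
        ← List.getD_eq_getElem?_getD]
    rw [h1]

theorem shape_set (n : Int) (M : List (List Int)) (r c : Nat) (v : Int) (hr : r < M.length)
    (h : pvShape n M) : pvShape n (M.set r ((M.getD r []).set c v)) := by
  obtain ⟨h1, h2⟩ := h
  refine ⟨by simpa using h1, ?_⟩
  intro r' hr'
  rcases List.mem_or_eq_of_mem_set hr' with hmem | heq
  · exact h2 _ hmem
  · subst heq
    rw [List.length_set]
    exact h2 _ (List.getD_eq_getElem M [] hr ▸ List.getElem_mem hr)

-- effect of the inner fill loop
theorem inner_fill (n d : Int) :
    ∀ (t : Nat) (a b : Int), (b - a).toNat = t → 0 ≤ a → a ≤ b → b ≤ n →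
      (∀ i : Int, a ≤ i → i < b → 0 ≤ d - i ∧ d - i < n) →
      ∀ (p : List (List Int) × Int), pvShape n p.1 →
        (((PySem.List.pyRange a b 1).foldl (pvAinner d) p).2 = p.2 + (b - a)) ∧
        pvShape n ((PySem.List.pyRange a b 1).foldl (pvAinner d) p).1 ∧
        (∀ i j : Nat,
          pvEnt ((PySem.List.pyRange a b 1).foldl (pvAinner d) p).1 i j =
            if a ≤ (i : Int) ∧ (i : Int) < b ∧ (j : Int) = d - (i : Int) then p.2 + ((i : Int) - a)
            else pvEnt p.1 i j) := by
  intro t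
  induction t with
  | zero =>
      intro a b ht h0 hab hbn hrange p hp
      rw [PySem.List.pyRange_one_eq_nil (by omega)]
      simp only [List.foldl_nil]
      refine ⟨by omega, hp, ?_⟩
      intro i j
      rw [if_neg (by omega)]
  | succ t ih =>
      intro a b ht h0 hab hbn hrange p hp
      have hlt : a < b := by omega
      rw [PySem.List.pyRange_one_cons hlt]
      simp only [List.foldl_cons]
      have hrange_a := hrange a (le_refl a) hlt
      have hca : ((a.toNat : Int)) = a := Int.toNat_of_nonneg h0
      have hr' : a.toNat < p.1.length := by rw [hp.1]; omega
      have hrowlen : (p.1.getD a.toNat []).length = n.toNat := by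
        rw [List.getD_eq_getElem _ _ hr']
        exact hp.2 _ (List.getElem_mem hr')
      have hc' : (d - a).toNat < (p.1.getD a.toNat []).length := by rw [hrowlen]; omega
      have hstep : pvAinner d p a
          = (p.1.set a.toNat ((p.1.getD a.toNat []).set (d - a).toNat p.2), p.2 + 1) := by
        show (PySem.List.pySetD p.1 a
            (PySem.List.pySetD (PySem.List.pyGetD p.1 a []) (d - a) p.2), p.2 + 1) = _
        rw [PySem.List.pySetD_of_nonneg _ _ h0, PySem.List.pySetD_of_nonneg _ _ hrange_a.1,
          PySem.List.pyGetD_eq_getElem _ _ h0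
            (by omega),
          List.getD_eq_getElem _ _ hr']
      rw [hstep]
      have hp' : pvShape n (p.1.set a.toNat ((p.1.getD a.toNat []).set (d - a).toNat p.2)) :=
        shape_set n p.1 a.toNat (d - a).toNat p.2 hr' hp
      obtain ⟨ihC, ihS, ihE⟩ := ih (a + 1) b (by omega) (by omega) (by omega) hbn
        (fun i hi1 hi2 => hrange i (by omega) hi2)
        ((p.1.set a.toNat ((p.1.getD a.toNat []).set (d - a).toNat p.2), p.2 + 1)) hp'
      refine ⟨by rw [ihC]; omega, ihS, ?_⟩
      intro i j
      rw [ihE i j]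
      have hent := ent_set p.1 a.toNat (d - a).toNat p.2 hr' hc' i j
      simp only [] at hent ⊢
      rw [hent]
      have hcd : ((d - a).toNat : Int) = d - a := Int.toNat_of_nonneg hrange_a.1
      by_cases h1 : a + 1 ≤ (i : Int) ∧ (i : Int) < b ∧ (j : Int) = d - (i : Int)
      · rw [if_pos h1, if_pos (by omega)]
        omega
      · rw [if_neg h1]
        by_cases h2 : i = a.toNat ∧ j = (d - a).toNat
        · rw [if_pos h2, if_pos (by omega)]
          omega
        · rw [if_neg h2, if_neg (by omega)]

-- outer loop invariant
theorem outer_inv (n : Int) :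
    ∀ D : Int, 0 ≤ D → D ≤ 2 * n - 1 →
      pvShape n (((PySem.List.pyRange 0 D 1).foldl (pvAouter n)
          ((PySem.List.pyRange 0 n 1).map (fun _ => (PySem.List.pyRange 0 n 1).map (fun _ => (0 : Int))), 1)).1) ∧
      (((PySem.List.pyRange 0 D 1).foldl (pvAouter n)
          ((PySem.List.pyRange 0 n 1).map (fun _ => (PySem.List.pyRange 0 n 1).map (fun _ => (0 : Int))), 1)).2 = pvS n D) ∧
      (∀ i j : Nat, (i : Int) < n → (j : Int) < n →
        pvEnt (((PySem.List.pyRange 0 D 1).foldl (pvAouter n)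
            ((PySem.List.pyRange 0 n 1).map (fun _ => (PySem.List.pyRange 0 n 1).map (fun _ => (0 : Int))), 1)).1) i j =
          if 2 ∣ ((i : Int) + j) ∧ (i : Int) + j < D then pvS n ((i : Int) + j) + (i - max 0 ((i : Int) + j - n + 1)) else 0) := by
  intro D hD
  induction D, hD using Int.le_induction with
  | base =>
      intro _
      rw [PySem.List.pyRange_one_eq_nil (le_refl 0)]
      simp only [List.foldl_nil]
      refine ⟨shape_zeros n, ?_, ?_⟩
      · show (1 : Int) = pvS n 0
        unfold pvS
        rw [PySem.List.pyRange_of_pos 0 0 (by norm_num)]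
        simp
      · intro i j hi hj
        rw [ent_zeros, if_neg (by omega)]
  | succ D hD0 ih =>
      intro hD1
      have hn1 : 1 ≤ n := by omega
      obtain ⟨ihS, ihC, ihE⟩ := ih (by omega)
      rw [PySem.List.pyRange_one_succ_right hD0, List.foldl_append]
      simp only [List.foldl_cons, List.foldl_nil]
      by_cases hD2 : 2 ∣ D
      · have hmod : PySem.Int.mod D 2 = 0 := (PySem.Int.mod_eq_zero_iff_dvd D 2).mpr hD2
        have hcond : (PySem.Int.mod D 2 == 0) = true := by rw [hmod]; rfl
        have hstep : ∀ st : List (List Int) × Int, pvAouter n st D =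
            (PySem.List.pyRange (max 0 (D - n + 1)) (min n (D + 1)) 1).foldl (pvAinner D) st := by
          intro st
          unfold pvAouter
          rw [hcond, if_pos rfl]
        rw [hstep]
        obtain ⟨hC', hS', hE'⟩ := inner_fill n D (min n (D + 1) - max 0 (D - n + 1)).toNat
          (max 0 (D - n + 1)) (min n (D + 1)) rfl (by omega) (by omega) (by omega)
          (fun i hi1 hi2 => by omega) _ ihS
        have hSsucc : pvS n (D + 1) = pvS n D + pvLen n D := by
          unfold pvS
          rw [pr2_even D hD0 hD2, List.map_append, List.sum_append]
          simp [pvLen]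
          ring
        refine ⟨hS', ?_, ?_⟩
        · rw [hC', ihC, hSsucc]
          unfold pvLen
          ring
        · intro i j hi hj
          rw [hE' i j, ihE i j hi hj]
          by_cases hij : (i : Int) + j = D
          · rw [if_pos (⟨by omega, by omega, by omega⟩ :
                max 0 (D - n + 1) ≤ (i : Int) ∧ (i : Int) < min n (D + 1) ∧ (j : Int) = D - (i : Int)),
              if_pos (⟨by omega, by omega⟩ :
                (2 : Int) ∣ ((i : Int) + j) ∧ (i : Int) + j < D + 1), ihC, hij]
          · rw [if_neg (by omega)]
            by_cases h2 : (2 : Int) ∣ ((i : Int) + j)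
            · by_cases hlt : (i : Int) + j < D
              · rw [if_pos ⟨h2, hlt⟩, if_pos ⟨h2, by omega⟩]
              · rw [if_neg (by omega), if_neg (by omega)]
            · rw [if_neg (by omega), if_neg (by omega)]
      · have hmod : ¬ PySem.Int.mod D 2 = 0 := by
          rw [PySem.Int.mod_eq_zero_iff_dvd]; exact hD2
        have hcond : (PySem.Int.mod D 2 == 0) = false := by
          rw [beq_eq_false_iff_ne]; exact hmod
        have hstep : ∀ st : List (List Int) × Int, pvAouter n st D = st := by
          intro st
          unfold pvAouter
          rw [hcond]
          simp
        rw [hstep]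
        refine ⟨ihS, ?_, ?_⟩
        · rw [ihC]
          unfold pvS
          rw [pr2_odd D hD0 hD2]
        · intro i j hi hj
          rw [ihE i j hi hj]
          by_cases h2 : (2 : Int) ∣ ((i : Int) + j)
          · by_cases hlt : (i : Int) + j < D
            · rw [if_pos ⟨h2, hlt⟩, if_pos ⟨h2, by omega⟩]
            · rw [if_neg (by omega), if_neg (by omega)]
          · rw [if_neg (by omega), if_neg (by omega)]

theorem ent_eq_getElem (M : List (List Int)) (i j : Nat) (hi : i < M.length)
    (hj : j < M[i].length) : pvEnt M i j = M[i][j] := by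
  unfold pvEnt
  have h1 : M.getD i [] = M[i] := List.getD_eq_getElem M [] hi
  rw [h1, List.getD_eq_getElem _ _ hj]

theorem ports_agree (n : Int) : matriz_e n = matriz_e_alt n := by
  by_cases hn : n ≤ 0
  · simp only [matriz_e, matriz_e_alt]
    rw [PySem.List.pyRange_one_eq_nil hn, PySem.List.pyRange_one_eq_nil (by omega : (2 * n - 1 : Int) ≤ 0)]
    simp
  · have hn' : (0 : Int) < n := by omega
    obtain ⟨hS, hC, hE⟩ := outer_inv n (2 * n - 1) (by omega) (le_refl _)
    simp only [matriz_e, matriz_e_alt]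
    apply List.ext_getElem
    · rw [hS.1, List.length_map, PySem.List.length_pyRange_one]
      omega
    · intro i hiA hiB
      have hi : i < n.toNat := by rw [hS.1] at hiA; exact hiA
      have hiInt : (i : Int) < n := by omega
      have hrowA := hS.2 _ (List.getElem_mem hiA)
      apply List.ext_getElem
      · rw [hrowA]
        simp only [List.getElem_map, List.length_map, PySem.List.length_pyRange_one]
        omega
      · intro j hjA hjB
        have hj : j < n.toNat := by rw [hrowA] at hjA; exact hjA
        have hjInt : (j : Int) < n := by omega
        simp only [List.getElem_map, PySem.List.getElem_pyRange_one, zero_add]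
        rw [← ent_eq_getElem _ i j hiA hjA, hE i j hiInt hjInt]
        by_cases h2 : (2 : Int) ∣ ((i : Int) + j)
        · have hcond : (PySem.Int.mod ((i : Int) + j) 2 == 0) = true := by
            rw [(PySem.Int.mod_eq_zero_iff_dvd ((i : Int) + j) 2).mpr h2]; rfl
          rw [hcond, if_pos rfl,
            if_pos (⟨h2, by omega⟩ : (2 : Int) ∣ ((i : Int) + j) ∧ (i : Int) + j < 2 * n - 1),
            bfold_getD n ((i : Int) + j) (by omega) h2 (2 * n - 1) (by omega)]
        · have hcond : (PySem.Int.mod ((i : Int) + j) 2 == 0) = false := by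
            rw [beq_eq_false_iff_ne, Ne, PySem.Int.mod_eq_zero_iff_dvd]
            exact h2
          rw [hcond, if_neg (fun hcontra => h2 hcontra.1), if_neg (by simp)]

-- ===== VERDICT (by name: the statement is the Claim_ definition above) =====
theorem matriz_e_spec : Claim_equal_matriz_e := by
  intro n _
  unfold Spec_matriz_e
  exact ports_agree n
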